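-- pv_equiv track=rewrite | github.com/nbalance97/Programmers | 2019 카카오 개발자 겨울 인턴십/불량 사용자.py | solution
-- ===== SOURCE A (Python) =====
-- from itertools import product
--
-- def match(user_id, banned_id):
--     if len(user_id) != len(banned_id):
--         return False
--
--     for i in range(len(user_id)):
--         if banned_id[i] == "*":
--             continue
--         if banned_id[i] != user_id[i]:
--             return False
--     return True
--
-- def solution(user_id, banned_id):
--     answer = 0
--     bucket = [[] for _ in range(len(banned_id))]
--
--     for idx, banned in enumerate(banned_id):
--         for idx2, user in enumerate(user_id):
--             if match(user, banned):
--                 bucket[idx].append(idx2)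
--
--     tot_list = set()
--     prod = list(product(*bucket))
--     for pd in prod:
--         if len(set(pd)) == len(pd):
--             pd = sorted(pd)
--             if tuple(pd) not in tot_list:
--                 tot_list.add(tuple(pd))
--                 answer = answer + 1
--     return answer
-- ===== SOURCE B (Python) =====
-- def solution(user_id, banned_id):
--     def matches(user, banned):
--         return len(user) == len(banned) and all(
--             b == "*" or b == u for u, b in zip(user, banned))
--
--     states = {()}
--     for banned in banned_id:
--         bucket = [i for i, user in enumerate(user_id) if matches(user, banned)]
--         states = {tuple(sorted(s + (u,))) for s in states for u in bucket if u not in s}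
--     return len(states)
-- ===== Notes on version B (the rewrite author's own statement) =====
-- stated objective: alternative
-- what changed: Replaces the full cartesian product over buckets (with per-tuple distinctness check, sort and global set-dedup) by a level-wise fold that extends a deduplicated set of sorted partial assignments one pattern at a time, merging permutation-redundant tuples as soon as they arise.
import Mathlib
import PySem

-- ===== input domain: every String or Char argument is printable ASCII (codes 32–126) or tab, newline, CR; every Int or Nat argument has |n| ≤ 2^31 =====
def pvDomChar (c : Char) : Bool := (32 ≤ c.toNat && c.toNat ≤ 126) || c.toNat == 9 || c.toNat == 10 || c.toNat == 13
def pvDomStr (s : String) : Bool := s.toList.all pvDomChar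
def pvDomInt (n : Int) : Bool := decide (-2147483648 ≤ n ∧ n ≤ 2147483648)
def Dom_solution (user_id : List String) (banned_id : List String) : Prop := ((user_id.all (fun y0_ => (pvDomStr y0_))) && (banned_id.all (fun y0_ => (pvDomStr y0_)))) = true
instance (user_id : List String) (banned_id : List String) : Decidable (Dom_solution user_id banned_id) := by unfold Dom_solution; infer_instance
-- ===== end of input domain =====

-- B replaces A's full cartesian product (with per-tuple sort and global dedup) by a
-- level-wise fold that deduplicates partial assignments as sets after each pattern.

-- ===== PORT A =====
-- 'match': the index loop as parallel structural recursion (the branch order is A's)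
def matchLoopA : List Char → List Char → Bool
  | u :: us, b :: bs =>
      if b == '*' then matchLoopA us bs
      else if b != u then false
      else matchLoopA us bs
  | _, _ => true

def matchPy (user banned : String) : Bool :=
  if user.toList.length != banned.toList.length then false
  else matchLoopA user.toList banned.toList

-- itertools.product(*bucket)
def prodA : List (List Int) → List (List Int)
  | [] => [[]]
  | b :: bs => b.flatMap (fun x => (prodA bs).map (fun t => x :: t))

def solution (user_id : List String) (banned_id : List String) : Int :=
  let bucket : List (List Int) :=
    (PySem.List.enumerate banned_id).map (fun q =>
      (PySem.List.enumerate user_id).foldl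
        (fun acc p => if matchPy p.2 q.2 then acc ++ [p.1] else acc) [])
  let prod := prodA bucket
  let res := prod.foldl
    (fun (st : PySem.Set (List Int) × Int) pd =>
      if PySem.Set.len (PySem.Set.ofList pd) == PySem.List.len pd then
        let pd' := PySem.List.sorted pd (fun x => x) false
        if PySem.Set.contains st.1 pd' then st
        else (PySem.Set.add st.1 pd', st.2 + 1)
      else st)
    (PySem.Set.empty, 0)
  res.2

-- ===== PORT B =====
def matchB (user banned : String) : Bool :=
  user.toList.length == banned.toList.length &&
  (user.toList.zip banned.toList).all (fun p => p.2 == '*' || p.2 == p.1)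

def solution_alt (user_id : List String) (banned_id : List String) : Int :=
  ((banned_id.foldl
    (fun (states : PySem.Set (List Int)) banned =>
      let bucket : List Int := (PySem.List.enumerate user_id).filterMap
        (fun p => if matchB p.2 banned then some p.1 else none)
      PySem.Set.ofList (states.flatMap (fun s =>
        bucket.filterMap (fun x =>
          if x ∈ s then none else some (PySem.List.sorted (s ++ [x]) (fun y => y) false)))))
    (PySem.Set.ofList [([] : List Int)])).length : Int)

-- ===== PRECONDITION & SPEC =====
def Spec_solution (user_id : List String) (banned_id : List String) (out : Int) : Prop := out = solution_alt user_id banned_id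
instance (user_id : List String) (banned_id : List String) (out : Int) : Decidable (Spec_solution user_id banned_id out) := by unfold Spec_solution; infer_instance

-- ===== CLAIM (what is proved, stated in full; the proofs are below) =====
def Claim_equal_solution : Prop := ∀ (user_id : List String) (banned_id : List String), Dom_solution user_id banned_id → Spec_solution user_id banned_id (solution user_id banned_id)

-- ===== LEMMAS AND PROOFS =====

-- abbreviations for the proof
def sortId (xs : List Int) : List Int := PySem.List.sorted xs (fun x => x) false

def bucketOf (user_id : List String) (banned : String) : List Int :=
  (PySem.List.enumerate user_id).filterMap
    (fun p => if matchB p.2 banned then some p.1 else none)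

def stepB (user_id : List String) (states : List (List Int)) (banned : String) : List (List Int) :=
  PySem.Set.ofList (states.flatMap (fun s =>
    (bucketOf user_id banned).filterMap (fun x =>
      if x ∈ s then none else some (sortId (s ++ [x])))))

def stepA (st : List (List Int) × Int) (pd : List Int) : List (List Int) × Int :=
  if PySem.Set.len (PySem.Set.ofList pd) == PySem.List.len pd then
    let pd' := PySem.List.sorted pd (fun x => x) false
    if PySem.Set.contains st.1 pd' then st
    else (PySem.Set.add st.1 pd', st.2 + 1)
  else st

def goodA (pd : List Int) : Option (List Int) :=
  if pd.Nodup then some (sortId pd) else none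

theorem matchLoop_eq (us bs : List Char) :
    matchLoopA us bs = (us.zip bs).all (fun p => p.2 == '*' || p.2 == p.1) := by
  induction us generalizing bs with
  | nil => cases bs <;> simp [matchLoopA]
  | cons u us ih =>
    cases bs with
    | nil => simp [matchLoopA]
    | cons b bs =>
      by_cases h1 : b = '*'
      · simp [matchLoopA, h1, ih]
      · by_cases h2 : b = u <;> simp [matchLoopA, h1, h2, ih]

theorem match_eq (u b : String) : matchPy u b = matchB u b := by
  unfold matchPy matchB
  rw [matchLoop_eq]
  by_cases h : u.length = b.length
  · have h1 : (u.toList.length != b.toList.length) = false := by simp [bne, h]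
    have h2 : (u.toList.length == b.toList.length) = true := by simp [h]
    rw [h1, h2, Bool.true_and, if_neg (by simp)]
  · have h1 : (u.toList.length != b.toList.length) = true := by simp [bne, h]
    have h2 : (u.toList.length == b.toList.length) = false := by simp [h]
    rw [h1, if_pos rfl, h2, Bool.false_and]

theorem ofList_len_iff (xs : List Int) :
    (PySem.Set.ofList xs).length = xs.length ↔ xs.Nodup := by
  induction xs using List.reverseRecOn with
  | nil => simp [PySem.Set.ofList_nil]
  | append_singleton ys x ih =>
    rw [PySem.Set.ofList_append_singleton]
    by_cases hx : x ∈ ys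
    · have h1 : PySem.Set.add (PySem.Set.ofList ys) x = PySem.Set.ofList ys :=
        PySem.Set.add_of_mem (by simp [PySem.Set.mem_ofList, hx])
      rw [h1]
      have h2 := PySem.Set.length_ofList_le (xs := ys)
      constructor
      · intro hlen; exfalso; simp at hlen; omega
      · intro hnd; simp [List.nodup_append] at hnd; exact absurd rfl (hnd.2 x hx)
    · have h1 : PySem.Set.add (PySem.Set.ofList ys) x = PySem.Set.ofList ys ++ [x] :=
        PySem.Set.add_of_not_mem (by simp [PySem.Set.mem_ofList, hx])
      rw [h1]
      simp [List.nodup_append, ih]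
      intro _ a ha e
      exact hx (e ▸ ha)

theorem condA_iff (pd : List Int) :
    (PySem.Set.len (PySem.Set.ofList pd) == PySem.List.len pd) = true ↔ pd.Nodup := by
  simp [PySem.Set.len, PySem.List.len, ofList_len_iff]

theorem sortId_perm (xs : List Int) : (sortId xs).Perm xs :=
  PySem.List.sorted_perm xs (fun x => x) false

theorem sortId_eq_of_perm {xs ys : List Int} (h : xs.Perm ys) : sortId xs = sortId ys :=
  PySem.List.sorted_eq_sorted_of_perm xs ys (fun x => x) (fun _ _ e => e) h

theorem sortId_nodup {xs : List Int} (h : xs.Nodup) : (sortId xs).Nodup :=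
  ((sortId_perm xs).nodup_iff).mpr h

theorem sortId_sortId (xs : List Int) : sortId (sortId xs) = sortId xs :=
  PySem.List.sorted_sorted xs (fun x => x)

-- A's fold: the first component is the running set of the good sorted tuples
theorem foldA_fst (l : List (List Int)) (s : List (List Int)) (c : Int) :
    (l.foldl stepA (s, c)).1 = PySem.Set.update s (l.filterMap goodA) := by
  induction l generalizing s c with
  | nil => simp [PySem.Set.update]
  | cons pd rest ih =>
    rw [List.foldl_cons, List.filterMap_cons]
    by_cases h : pd.Nodup
    · have hg : goodA pd = some (sortId pd) := by simp [goodA, h]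
      have hc : (PySem.Set.len (PySem.Set.ofList pd) == PySem.List.len pd) = true :=
        (condA_iff pd).mpr h
      rw [hg]
      by_cases hm : PySem.Set.contains s (PySem.List.sorted pd (fun x => x) false) = true
      · have hadd : PySem.Set.add s (PySem.List.sorted pd (fun x => x) false) = s :=
          PySem.Set.add_of_mem ((PySem.Set.contains_iff _ _).mp hm)
        simp only [stepA, hc, if_true, hm, ih, PySem.Set.update_cons, sortId, hadd]
      · simp only [stepA, hc, if_true, hm, Bool.false_eq_true, if_false, ih,
          PySem.Set.update_cons, sortId]
    · have hg : goodA pd = none := by simp [goodA, h]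
      have hc : (PySem.Set.len (PySem.Set.ofList pd) == PySem.List.len pd) = false := by
        by_contra hcc
        simp only [Bool.not_eq_false] at hcc
        exact h ((condA_iff pd).mp hcc)
      rw [hg]
      simp only [stepA, hc, Bool.false_eq_true, if_false, ih]

-- A's fold: the counter tracks the size of the set
theorem foldA_snd (l : List (List Int)) (s : List (List Int)) (c : Int) :
    (l.foldl stepA (s, c)).2 - ((l.foldl stepA (s, c)).1.length : Int)
      = c - (s.length : Int) := by
  induction l generalizing s c with
  | nil => simp
  | cons pd rest ih =>
    simp only [List.foldl_cons, stepA]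
    by_cases hc : (PySem.Set.len (PySem.Set.ofList pd) == PySem.List.len pd) = true
    · simp only [hc, if_true]
      by_cases hm : PySem.Set.contains s (PySem.List.sorted pd (fun x => x) false) = true
      · simp only [hm, if_true]; exact ih s c
      · simp only [hm, Bool.false_eq_true, if_false]
        have hadd : PySem.Set.add s (PySem.List.sorted pd (fun x => x) false)
            = s ++ [PySem.List.sorted pd (fun x => x) false] :=
          PySem.Set.add_of_not_mem (fun hmem => hm ((PySem.Set.contains_iff _ _).mpr hmem))
        rw [hadd, ih]
        simp
    · simp only [hc, Bool.false_eq_true, if_false]; exact ih s c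

theorem mem_stepB (u : List String) (S : List (List Int)) (b : String) (x : List Int) :
    x ∈ stepB u S b ↔
      ∃ s ∈ S, ∃ v ∈ bucketOf u b, v ∉ s ∧ x = sortId (s ++ [v]) := by
  simp only [stepB, PySem.Set.mem_ofList, List.mem_flatMap, List.mem_filterMap]
  constructor
  · rintro ⟨s, hs, v, hv, he⟩
    by_cases hm : v ∈ s
    · simp [hm] at he
    · simp [hm] at he
      exact ⟨s, hs, v, hv, hm, he.symm⟩
  · rintro ⟨s, hs, v, hv, hm, he⟩
    exact ⟨s, hs, v, hv, by simp [hm, he]⟩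

def InvB (S : List (List Int)) : Prop := ∀ s ∈ S, s.Nodup ∧ sortId s = s

theorem invB_step (u : List String) (S : List (List Int)) (b : String)
    (h : InvB S) : InvB (stepB u S b) := by
  intro s' hs'
  obtain ⟨s, hs, v, _, hv, he⟩ := (mem_stepB u S b s').mp hs'
  have hnd : (s ++ [v]).Nodup := by
    simp only [List.nodup_append, List.nodup_singleton, true_and]
    refine ⟨(h s hs).1, ?_⟩
    intro a ha b hb e
    simp at hb
    exact hv ((e.trans hb) ▸ ha)
  exact ⟨he ▸ sortId_nodup hnd, he ▸ sortId_sortId _⟩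

theorem perm_bridge (s : List Int) (v : Int) (t : List Int) :
    (sortId (s ++ [v]) ++ t).Perm (s ++ v :: t) := by
  have h1 : (sortId (s ++ [v]) ++ t).Perm ((s ++ [v]) ++ t) :=
    (sortId_perm (s ++ [v])).append_right t
  have h2 : (s ++ [v]) ++ t = s ++ v :: t := by simp
  rw [h2] at h1; exact h1

theorem foldB_mem (u : List String) (bs : List String) (S : List (List Int))
    (h : InvB S) (x : List Int) :
    x ∈ bs.foldl (stepB u) S ↔
      ∃ s ∈ S, ∃ pd ∈ prodA (bs.map (bucketOf u)),
        (s ++ pd).Nodup ∧ x = sortId (s ++ pd) := by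
  induction bs generalizing S with
  | nil =>
    simp only [List.foldl_nil, List.map_nil, prodA, List.mem_singleton]
    constructor
    · intro hx
      exact ⟨x, hx, [], rfl, by simp [(h x hx).1], by simp [(h x hx).2]⟩
    · rintro ⟨s, hs, pd, hpd, _, he⟩
      subst hpd
      simpa [he, (h s hs).2] using hs
  | cons b rest ih =>
    simp only [List.foldl_cons, List.map_cons, prodA, List.mem_flatMap, List.mem_map]
    rw [ih (stepB u S b) (invB_step u S b h)]
    constructor
    · rintro ⟨s', hs', t, ht, hnd, he⟩
      obtain ⟨s, hs, v, hv, hm, hse⟩ := (mem_stepB u S b s').mp hs'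
      subst hse
      have hp := perm_bridge s v t
      refine ⟨s, hs, v :: t, ⟨v, hv, t, ht, rfl⟩, hp.nodup_iff.mp hnd, ?_⟩
      rw [he]; exact sortId_eq_of_perm hp
    · rintro ⟨s, hs, pd, ⟨v, hv, t, ht, hpd⟩, hnd, he⟩
      subst hpd
      have hm : v ∉ s := by
        intro hvs
        rw [List.nodup_append] at hnd
        exact hnd.2.2 v hvs v (List.Mem.head t) rfl
      have hp := perm_bridge s v t
      refine ⟨sortId (s ++ [v]), (mem_stepB u S b _).mpr ⟨s, hs, v, hv, hm, rfl⟩,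
        t, ht, hp.nodup_iff.mpr hnd, ?_⟩
      rw [he]; exact (sortId_eq_of_perm hp).symm

theorem foldB_nodup (u : List String) (bs : List String) (S : List (List Int))
    (h : S.Nodup) : (bs.foldl (stepB u) S).Nodup := by
  induction bs generalizing S with
  | nil => exact h
  | cons b rest ih => exact ih _ (by unfold stepB; exact PySem.Set.nodup_ofList _)

theorem filterMap_if_eq (b : String) (l : List (Int × String)) :
    List.map (fun p : Int × String => p.1) (l.filter (fun p => matchB p.2 b))
      = l.filterMap (fun p => if matchB p.2 b then some p.1 else none) := by
  induction l with
  | nil => rfl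
  | cons p ps ih => by_cases h : matchB p.2 b = true <;>
      simp [h, ih]

theorem bucketA_eq (u : List String) (b : String) :
    (PySem.List.enumerate u).foldl
      (fun acc p => if matchPy p.2 b then acc ++ [p.1] else acc) []
      = bucketOf u b := by
  rw [PySem.List.foldl_append_if (p := fun p : Int × String => matchPy p.2 b)
        (f := fun p : Int × String => p.1)]
  have hfun : (fun p : Int × String => matchPy p.2 b) = fun p => matchB p.2 b :=
    funext fun p => match_eq p.2 b
  rw [hfun]
  unfold bucketOf
  simpa using filterMap_if_eq b (PySem.List.enumerate u)

theorem solution_main (user_id : List String) (banned_id : List String) :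
    solution user_id banned_id = solution_alt user_id banned_id := by
  have hbuckets :
      (PySem.List.enumerate banned_id).map (fun q =>
        (PySem.List.enumerate user_id).foldl
          (fun acc p => if matchPy p.2 q.2 then acc ++ [p.1] else acc) [])
      = banned_id.map (bucketOf user_id) := by
    have h1 : (PySem.List.enumerate banned_id).map (fun q =>
        (PySem.List.enumerate user_id).foldl
          (fun acc p => if matchPy p.2 q.2 then acc ++ [p.1] else acc) [])
        = (PySem.List.enumerate banned_id).map (fun q => bucketOf user_id q.2) := by
      exact List.map_congr_left (fun q _ => bucketA_eq user_id q.2)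
    rw [h1, show (fun q : Int × String => bucketOf user_id q.2)
          = (bucketOf user_id) ∘ (fun q : Int × String => q.2) from rfl,
        ← List.map_map, PySem.List.map_snd_enumerate]
  -- A's value
  have hA : solution user_id banned_id
      = ((PySem.Set.ofList ((prodA (banned_id.map (bucketOf user_id))).filterMap goodA)).length : Int) := by
    show ((prodA _).foldl stepA (PySem.Set.empty, 0)).2 = _
    rw [hbuckets]
    have h2 := foldA_snd (prodA (banned_id.map (bucketOf user_id))) [] 0
    have h1 := foldA_fst (prodA (banned_id.map (bucketOf user_id))) [] 0
    rw [PySem.Set.update_nil_left] at h1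
    show ((prodA (banned_id.map (bucketOf user_id))).foldl stepA ([], 0)).2 = _
    rw [h1] at h2
    simp at h2
    omega
  -- B's value
  have hB : solution_alt user_id banned_id
      = ((banned_id.foldl (stepB user_id) [([] : List Int)]).length : Int) := rfl
  rw [hA, hB]
  have hinv : InvB [([] : List Int)] := by
    intro s hs; simp at hs; subst hs
    exact ⟨List.nodup_nil, rfl⟩
  have hmem : ∀ x, x ∈ (banned_id.foldl (stepB user_id) [([] : List Int)])
      ↔ x ∈ PySem.Set.ofList ((prodA (banned_id.map (bucketOf user_id))).filterMap goodA) := by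
    intro x
    rw [foldB_mem user_id banned_id _ hinv x]
    simp only [PySem.Set.mem_ofList, List.mem_filterMap, List.mem_singleton, goodA]
    constructor
    · rintro ⟨s, hs, pd, hpd, hnd, he⟩
      subst hs
      simp at hnd he
      exact ⟨pd, hpd, by simp [hnd, he]⟩
    · rintro ⟨pd, hpd, he⟩
      by_cases h : pd.Nodup
      · simp [h] at he
        exact ⟨[], rfl, pd, hpd, by simpa using h, by simpa using he.symm⟩
      · simp [h] at he
  have hperm : (banned_id.foldl (stepB user_id) [([] : List Int)]).Perm
      (PySem.Set.ofList ((prodA (banned_id.map (bucketOf user_id))).filterMap goodA)) := by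
    rw [List.perm_ext_iff_of_nodup
      (foldB_nodup user_id banned_id _ (List.nodup_singleton _)) (PySem.Set.nodup_ofList _)]
    exact hmem
  rw [hperm.length_eq]

-- ===== VERDICT (by name: the statement is the Claim_ definition above) =====
theorem solution_spec : Claim_equal_solution := by
  intro u b _; exact solution_main u b
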